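-- pv_equiv track=rewrite | github.com/Yash-YC/Source-Code-Plagiarism-Detection | train/Ztrusco/__init__.py | generate
-- ===== SOURCE A (Python) =====
-- def generate(word, w):
--
--     if len(word) == len(w):
--         return [w]
--
--     w1 = w
--     w4 = w
--
--     w1 = word[len(w)] + w1
--     w4 = w4 + word[len(w)]
--
--     return generate(word, w1) + generate(word, w4)
-- ===== SOURCE B (Python) =====
-- def generate(word, w):
--     result = [w]
--     for i in range(len(w), len(word)):
--         c = word[i]
--         result = [x for s in result for x in (c + s, s + c)]
--     return result
-- ===== Notes on version B (the rewrite author's own statement) =====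
-- stated objective: simpler
-- what changed: Replaces the binary recursion (which concatenates 2^k recursive results) with a single iterative bottom-up pass that rebuilds the list level by level, prepend before append, preserving order exactly.
-- crash fix: When len(w) > len(word) A raises IndexError (word[len(w)] out of range); B's loop range is empty there and it returns [w]. — e.g. on generate("a", "xy"): A raises IndexError, B returns ["xy"]
import Mathlib
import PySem

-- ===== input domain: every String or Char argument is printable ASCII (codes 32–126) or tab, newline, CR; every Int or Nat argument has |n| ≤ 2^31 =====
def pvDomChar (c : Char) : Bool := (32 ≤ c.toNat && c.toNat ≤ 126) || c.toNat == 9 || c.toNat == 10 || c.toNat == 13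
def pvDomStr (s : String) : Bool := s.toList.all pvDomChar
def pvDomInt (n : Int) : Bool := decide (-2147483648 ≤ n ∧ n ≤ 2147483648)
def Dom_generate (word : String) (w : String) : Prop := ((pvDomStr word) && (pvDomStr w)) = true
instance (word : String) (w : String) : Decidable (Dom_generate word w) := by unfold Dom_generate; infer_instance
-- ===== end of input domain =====

-- B replaces A's binary recursion by one iterative level-by-level rebuild of the list (same output, same order); where A raises IndexError (len(w) > len(word)) B returns [w].


-- ===== PORT A =====
def generate (word : String) (w : String) : List String :=
  if PySem.Str.len word == PySem.Str.len w then [w]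
  else
    match h : PySem.Str.pyGet? word (PySem.Str.len w) with
    | none => []  -- Python raises IndexError here (word[len(w)] out of range); excluded by Pre_
    | some c =>
      generate word (c.toString ++ w) ++ generate word (w ++ c.toString)
termination_by word.length - w.length
decreasing_by
  all_goals {
    have h' := h
    simp at h'
    have hlt : w.length < word.length := by
      have := (List.getElem?_eq_some_iff.mp h').1
      simpa using this
    simp only [String.length_append, Char.length_toString]
    omega }

-- ===== PORT B =====
def generate_alt (word : String) (w : String) : List String :=
  (PySem.List.pyRange (PySem.Str.len w) (PySem.Str.len word) 1).foldl
    (fun result i =>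
      result.flatMap (fun s =>
        match PySem.Str.pyGet? word i with
        | some c => [c.toString ++ s, s ++ c.toString]
        | none => []))  -- unreachable: i is a valid index of word inside the loop
    [w]

-- ===== PRECONDITION & SPEC =====
-- Pre_ excludes exactly the inputs where A raises IndexError: len(w) > len(word).
def Pre_generate (word : String) (w : String) : Prop := w.length ≤ word.length
instance (word : String) (w : String) : Decidable (Pre_generate word w) := by unfold Pre_generate; infer_instance
def pvWitness_generate : String × String := ("abc", "b")

-- When len(w) > len(word) A raises IndexError (word[len(w)] out of range); B's loop range is empty there and it returns [w].
def Raises_generate (word : String) (w : String) : Prop := word.length < w.length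
instance (word : String) (w : String) : Decidable (Raises_generate word w) := by unfold Raises_generate; infer_instance
def pvRaiseWitness_generate : String × String := ("a", "xy")
def pvRaiseWitnessOut_generate : List String := ["xy"]

def Spec_generate (word : String) (w : String) (out : List String) : Prop := out = generate_alt word w
instance (word : String) (w : String) (out : List String) : Decidable (Spec_generate word w out) := by unfold Spec_generate; infer_instance

-- ===== CLAIM (what is proved, stated in full; the proofs are below) =====
def Claim_equal_generate : Prop := ∀ (word : String) (w : String), Dom_generate word w → Pre_generate word w → Spec_generate word w (generate word w)
def Claim_raises_generate : Prop := (∀ (word : String) (w : String), Dom_generate word w → Raises_generate word w → ¬ Pre_generate word w) ∧ (Dom_generate (pvRaiseWitness_generate.1) (pvRaiseWitness_generate.2) ∧ Raises_generate (pvRaiseWitness_generate.1) (pvRaiseWitness_generate.2) ∧ generate_alt (pvRaiseWitness_generate.1) (pvRaiseWitness_generate.2) = pvRaiseWitnessOut_generate)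

-- ===== LEMMAS AND PROOFS =====

-- the level-rebuild step distributes over ++ of the accumulator
theorem foldl_flatMap_append (l : List Int) (f : Int → String → List String)
    (xs ys : List String) :
    l.foldl (fun result i => result.flatMap (f i)) (xs ++ ys)
      = l.foldl (fun result i => result.flatMap (f i)) xs
        ++ l.foldl (fun result i => result.flatMap (f i)) ys := by
  induction l generalizing xs ys with
  | nil => rfl
  | cons a t ih => simp only [List.foldl_cons, List.flatMap_append]; exact ih _ _

theorem alt_base (word w : String) (h : word.length = w.length) :
    generate_alt word w = [w] := by
  unfold generate_alt
  rw [PySem.Str.len_eq, PySem.Str.len_eq,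
    PySem.List.pyRange_one_eq_nil
      (by simp only [String.length_toList]; exact_mod_cast h.le),
    List.foldl_nil]

theorem alt_step (word w : String) (c : Char)
    (hc : PySem.Str.pyGet? word (PySem.Str.len w) = some c)
    (hlt : w.length < word.length) :
    generate_alt word w
      = generate_alt word (c.toString ++ w) ++ generate_alt word (w ++ c.toString) := by
  unfold generate_alt
  rw [show PySem.Str.len (c.toString ++ w) = PySem.Str.len w + 1 by
        simp,
      show PySem.Str.len (w ++ c.toString) = PySem.Str.len w + 1 by
        simp,
      PySem.List.pyRange_one_cons (by simp; exact_mod_cast hlt),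
      List.foldl_cons,
      show ([w].flatMap (fun s =>
        match PySem.Str.pyGet? word (PySem.Str.len w) with
        | some c => [c.toString ++ s, s ++ c.toString]
        | none => [])) = [c.toString ++ w] ++ [w ++ c.toString] by
        simp only [List.flatMap_cons, List.flatMap_nil, List.append_nil, hc,
          List.singleton_append],
      foldl_flatMap_append]

theorem generate_eq_alt (word w : String) (h : w.length ≤ word.length) :
    generate word w = generate_alt word w := by
  rw [generate]
  split
  · next he =>
    have he' : word.length = w.length := by simpa using he
    rw [alt_base word w he']
  · next he =>
    have hlt : w.length < word.length := by
      rcases lt_or_eq_of_le h with h1 | h1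
      · exact h1
      · exact absurd (by simpa using h1.symm) he
    split
    · next hG =>
      exfalso
      have := hG
      simp at this
      omega
    · next c hG =>
      have h1 : (c.toString ++ w).length = w.length + 1 := by simp; omega
      have h4 : (w ++ c.toString).length = w.length + 1 := by simp
      rw [generate_eq_alt word (c.toString ++ w) (by omega),
          generate_eq_alt word (w ++ c.toString) (by omega),
          ← alt_step word w c hG hlt]
termination_by word.length - w.length
decreasing_by
  · simp only [String.length_append, Char.length_toString]; omega
  · simp only [String.length_append, Char.length_toString]; omega

-- ===== VERDICT (by name: the statement is the Claim_ definition above) =====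
theorem generate_spec : Claim_equal_generate := by
  intro word w _ hpre
  unfold Spec_generate
  exact generate_eq_alt word w hpre

@[simp] theorem generate_raises : Claim_raises_generate := by
  unfold Claim_raises_generate
  exact ⟨fun word w _ hr hp => by unfold Raises_generate at hr; unfold Pre_generate at hp; omega,
    by decide⟩
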